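-- pv_equiv track=rewrite | github.com/Viktoria12007/Python_Basic | Module22/03_zen_of_python_2/main.py | get_count_rarest_letters
-- ===== SOURCE A (Python) =====
-- def get_count_rarest_letters(data):
--     all_isalpha_symbols = tuple(symbol.lower() for symbol in data if symbol.isalpha())
--     symbols = {}
--     for index, symbol in enumerate(all_isalpha_symbols):
--         if symbol not in symbols:
--             symbols[symbol] = 1
--         else:
--             symbols[symbol] += 1
--
--     return sorted(symbols.items(), key=lambda item: item[1])[0][0]
-- ===== SOURCE B (Python) =====
-- def get_count_rarest_letters(data):
--     seq = [symbol.lower() for symbol in data if symbol.isalpha()]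
--     rarest = seq[0]
--     for symbol in dict.fromkeys(seq):
--         if seq.count(symbol) < seq.count(rarest):
--             rarest = symbol
--     return rarest
-- ===== Notes on version B (the rewrite author's own statement) =====
-- stated objective: alternative
-- what changed: Replaces the count-dict build plus full sort of the items by a running-minimum scan over the deduplicated letters (dict.fromkeys) that keeps the first letter whose seq.count is strictly smallest; strict < reproduces the stable sort's first-appearance tie-break, so no counting table and no sort are needed.
import Mathlib
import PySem

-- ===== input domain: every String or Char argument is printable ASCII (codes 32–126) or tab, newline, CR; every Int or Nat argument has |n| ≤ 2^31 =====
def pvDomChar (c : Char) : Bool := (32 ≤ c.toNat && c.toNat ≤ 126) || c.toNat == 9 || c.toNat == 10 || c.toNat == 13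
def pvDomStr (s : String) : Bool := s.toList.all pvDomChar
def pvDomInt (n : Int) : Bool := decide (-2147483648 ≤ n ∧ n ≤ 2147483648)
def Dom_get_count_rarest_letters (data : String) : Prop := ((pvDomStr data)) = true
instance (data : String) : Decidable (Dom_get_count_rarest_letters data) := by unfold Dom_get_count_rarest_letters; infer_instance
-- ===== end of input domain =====

-- B replaces A's count-dict + stable sort of the items by a single running-minimum scan
-- (first letter with strictly smallest seq.count): an alternative of similar cost, no dict and no sort.

-- ===== PORT A =====
-- dict keys are the lowercased alphabetic characters, modeled as Char (exact on the ASCII domain,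
-- where .lower() of one alphabetic character is one character).
def get_count_rarest_letters (data : String) : String :=
  let all_isalpha_symbols := (data.toList.filter (fun symbol => PySem.Chars.isalpha symbol)).map PySem.Chars.lowerChar
  let symbols : PySem.Dict Char Int :=
    (PySem.List.enumerate all_isalpha_symbols).foldl (fun d p =>
      if d.contains p.2 = false then d.insert p.2 1
      else d.insert p.2 (d.getD p.2 0 + 1)) PySem.Dict.empty
  -- `sorted(...)[0]` raises IndexError when there is no letter: excluded by Pre_; dummy default
  String.ofList [(PySem.List.pyGetD (PySem.List.sorted symbols.items (fun item => item.2) false) 0 (' ', 0)).1]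

-- ===== PORT B =====
def get_count_rarest_letters_alt (data : String) : String :=
  let seq := (data.toList.filter (fun symbol => PySem.Chars.isalpha symbol)).map PySem.Chars.lowerChar
  -- `seq[0]` raises IndexError when there is no letter: excluded by Pre_; dummy default
  let rarest := (PySem.List.dedup seq).foldl (fun rarest symbol =>
      if (seq.count symbol : Int) < (seq.count rarest : Int) then symbol else rarest)
    (PySem.List.pyGetD seq 0 ' ')
  String.ofList [rarest]

-- ===== PRECONDITION & SPEC =====
-- Pre_ excludes exactly the inputs with no alphabetic character, on which A raises IndexError
-- (sorted(symbols.items())[0] on an empty list); B raises IndexError there too (seq[0]).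
def Pre_get_count_rarest_letters (data : String) : Prop :=
  (data.toList.filter (fun symbol => PySem.Chars.isalpha symbol)) ≠ []
instance (data : String) : Decidable (Pre_get_count_rarest_letters data) := by
  unfold Pre_get_count_rarest_letters; infer_instance
def pvWitness_get_count_rarest_letters : String := "Hello, World!"

def Spec_get_count_rarest_letters (data : String) (out : String) : Prop := out = get_count_rarest_letters_alt data
instance (data : String) (out : String) : Decidable (Spec_get_count_rarest_letters data out) := by unfold Spec_get_count_rarest_letters; infer_instance

-- ===== CLAIM (what is proved, stated in full; the proofs are below) =====
def Claim_equal_get_count_rarest_letters : Prop := ∀ (data : String), Dom_get_count_rarest_letters data → Pre_get_count_rarest_letters data → Spec_get_count_rarest_letters data (get_count_rarest_letters data)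

-- ===== LEMMAS AND PROOFS =====

/-- A loop over `enumerate xs` that only uses the element is a loop over `xs`. -/
theorem pv_foldl_enumerate_snd {α β : Type} (g : β → α → β) :
    ∀ (xs : List α) (s : Int) (b : β),
      (PySem.List.enumerate xs s).foldl (fun d p => g d p.2) b = xs.foldl g b := by
  intro xs
  induction xs with
  | nil => intro s b; simp [PySem.List.enumerate_nil]
  | cons x t ih => intro s b; simp [PySem.List.enumerate_cons, List.foldl_cons, ih]

/-- A's dict-building step is `d.insert c (d.getD c 0 + 1)` in both branches. -/
theorem pv_stepA_eq :
    (fun (d : PySem.Dict Char Int) (c : Char) =>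
        if d.contains c = false then d.insert c 1 else d.insert c (d.getD c 0 + 1))
      = fun (d : PySem.Dict Char Int) (c : Char) => d.insert c (d.getD c 0 + 1) := by
  funext d c
  by_cases h : d.contains c
  · simp [h]
  · simp only [eq_false_of_ne_true h, if_pos]
    rw [PySem.Dict.getD_of_not_contains d 0 (by simpa using h)]
    norm_num

/-- Head of the stable insertion-sort fold = running first-minimum fold. -/
theorem pv_headI_foldl_insertBy {α : Type} [Inhabited α] (key : α → Int) :
    ∀ (l acc : List α), acc ≠ [] →
      (l.foldl (fun acc x => PySem.List.insertBy (fun a b => decide (key a < key b)) x acc) acc).headI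
        = l.foldl (fun b y => if key y < key b then y else b) acc.headI := by
  intro l
  induction l with
  | nil => intro acc h; rfl
  | cons y t ih =>
    intro acc h
    match acc with
    | a :: as =>
      rw [List.foldl_cons, List.foldl_cons]
      have hne : PySem.List.insertBy (fun a b => decide (key a < key b)) y (a :: as) ≠ [] := by
        simp only [PySem.List.insertBy]
        split <;> simp
      rw [ih _ hne]
      have hh : (PySem.List.insertBy (fun a b => decide (key a < key b)) y (a :: as)).headI
          = if key y < key a then y else a := by
        simp only [PySem.List.insertBy]
        split
        · next h => rw [if_pos (by simpa using h)]; rfl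
        · next h => rw [if_neg (by simpa using h)]; rfl
      rw [hh]
      rfl

/-- `sorted(m :: t, key)` begins with the first key-minimal element, as a left fold. -/
theorem pv_headI_sorted {α : Type} [Inhabited α] (key : α → Int) (m : α) (t : List α) :
    (PySem.List.sorted (m :: t) key false).headI
      = t.foldl (fun b y => if key y < key b then y else b) m := by
  rw [PySem.List.sorted_eq_foldl_insertBy, List.foldl_cons]
  have h1 : PySem.List.insertBy (fun a b => decide (key a < key b)) m ([] : List α) = [m] := rfl
  rw [h1, pv_headI_foldl_insertBy key t [m] (by simp)]
  rfl

/-- The pair-valued minimum fold over `D.map (fun c => (c, key c))` tracks the Char fold. -/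
theorem pv_foldl_min_map {α : Type} (key : α → Int) :
    ∀ (D : List α) (b : α),
      (D.map (fun c => (c, key c))).foldl (fun a y => if y.2 < a.2 then y else a) (b, key b)
        = (D.foldl (fun b c => if key c < key b then c else b) b,
           key (D.foldl (fun b c => if key c < key b then c else b) b)) := by
  intro D
  induction D with
  | nil => intro b; rfl
  | cons c t ih =>
    intro b
    rw [List.map_cons, List.foldl_cons, List.foldl_cons]
    by_cases h : key c < key b
    · simp only [if_pos h, ih]
    · simp only [if_neg h, ih]

/-- `Set.update s l` only appends to `s`. -/
theorem pv_update_prefix {α : Type} [BEq α] :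
    ∀ (l : List α) (s : PySem.Set α), ∃ r, PySem.Set.update s l = s ++ r := by
  intro l
  induction l with
  | nil => intro s; exact ⟨[], by simp [PySem.Set.update]⟩
  | cons y t ih =>
    intro s
    have hstep : PySem.Set.update s (y :: t) = PySem.Set.update (PySem.Set.add s y) t := rfl
    by_cases h : PySem.Set.contains s y
    · obtain ⟨r, hr⟩ := ih s
      exact ⟨r, by rw [hstep, PySem.Set.add, if_pos h, hr]⟩
    · obtain ⟨r, hr⟩ := ih (s ++ [y])
      refine ⟨y :: r, ?_⟩
      rw [hstep, PySem.Set.add, if_neg h, hr, List.append_assoc]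
      rfl

/-- Core equivalence on the nonempty lowercased-letter sequence `x :: L'`. -/
theorem pv_core (x : Char) (L' : List Char) :
    (PySem.List.pyGetD (PySem.List.sorted
        ((PySem.List.enumerate (x :: L')).foldl (fun d p =>
            if d.contains p.2 = false then d.insert p.2 1
            else d.insert p.2 (d.getD p.2 0 + 1)) (PySem.Dict.empty : PySem.Dict Char Int)).items
        (fun item => item.2) false) 0 (' ', 0)).1
      = (PySem.List.dedup (x :: L')).foldl (fun rarest symbol =>
          if (((x :: L').count symbol : Int)) < (((x :: L').count rarest : Int)) then symbol
          else rarest) (PySem.List.pyGetD (x :: L') 0 ' ') := by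
  have hdict : ((PySem.List.enumerate (x :: L')).foldl (fun d p =>
      if d.contains p.2 = false then d.insert p.2 1
      else d.insert p.2 (d.getD p.2 0 + 1)) (PySem.Dict.empty : PySem.Dict Char Int))
      = PySem.Dict.counter (x :: L') := by
    have h1 : ((PySem.List.enumerate (x :: L')).foldl (fun d p =>
        if d.contains p.2 = false then d.insert p.2 1
        else d.insert p.2 (d.getD p.2 0 + 1)) (PySem.Dict.empty : PySem.Dict Char Int))
        = (x :: L').foldl (fun d c =>
            if d.contains c = false then d.insert c 1
            else d.insert c (d.getD c 0 + 1)) PySem.Dict.empty :=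
      pv_foldl_enumerate_snd (g := fun (d : PySem.Dict Char Int) c =>
        if d.contains c = false then d.insert c 1
        else d.insert c (d.getD c 0 + 1)) (x :: L') 0 PySem.Dict.empty
    rw [h1, pv_stepA_eq, PySem.Dict.foldl_insert_getD_add_one_eq_counter]
  rw [hdict, PySem.Dict.items_counter]
  -- name the count key
  set key : Char → Int := fun c => ((x :: L').count c : Int) with hkey
  -- the distinct letters: Set.ofList (x :: L') = x :: r
  obtain ⟨r, hr⟩ := pv_update_prefix L' ([x] : PySem.Set Char)
  have hof : PySem.Set.ofList (x :: L') = x :: r := by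
    rw [PySem.Set.ofList_eq_foldl, List.foldl_cons]
    exact hr
  rw [hof]
  -- left side: head of the stable sort of the items
  have hnil : PySem.List.sorted ((x :: r).map (fun k => (k, key k)))
      (fun item => item.2) false ≠ [] := by
    rw [Ne, PySem.List.sorted_eq_nil_iff]; simp
  have hget : (PySem.List.pyGetD (PySem.List.sorted ((x :: r).map (fun k => (k, key k)))
      (fun item => item.2) false) 0 (' ', 0))
      = (PySem.List.sorted ((x :: r).map (fun k => (k, key k)))
      (fun item => item.2) false).headI := by
    match hs : PySem.List.sorted ((x :: r).map (fun k => (k, key k)))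
        (fun item => item.2) false with
    | [] => exact absurd hs hnil
    | m :: t => simp [PySem.List.pyGetD, PySem.List.pyGet?, PySem.List.pyIdx?]
  rw [hget, List.map_cons]
  rw [pv_headI_sorted (fun item => item.2) (x, key x) (r.map (fun k => (k, key k)))]
  rw [pv_foldl_min_map key r x]
  -- right side: dict.fromkeys(seq) is the ordered dedup = Set.ofList
  have hx0 : PySem.List.pyGetD (x :: L') 0 ' ' = x := by
    simp [PySem.List.pyGetD, PySem.List.pyGet?, PySem.List.pyIdx?]
  rw [hx0, PySem.List.dedup_eq_ofList, hof, List.foldl_cons,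
    if_neg (by omega : ¬ key x < key x)]

-- ===== VERDICT (by name: the statement is the Claim_ definition above) =====
theorem get_count_rarest_letters_spec : Claim_equal_get_count_rarest_letters := by
  intro data _hdom hpre
  unfold Spec_get_count_rarest_letters get_count_rarest_letters get_count_rarest_letters_alt
  simp only []
  have hpre' : (data.toList.filter (fun symbol => PySem.Chars.isalpha symbol)).map
      PySem.Chars.lowerChar ≠ [] := by
    intro h
    exact hpre (List.map_eq_nil_iff.mp h)
  match hL : (data.toList.filter (fun symbol => PySem.Chars.isalpha symbol)).map
      PySem.Chars.lowerChar with
  | [] => exact absurd hL hpre'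
  | x :: L' => exact congrArg (fun c => String.ofList [c]) (pv_core x L')
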